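-- pv_equiv track=rewrite | github.com/yeolsim2hajo/Team_hard | wonkyoung/programmers/level 0/등수_매기기.py | solution
-- ===== SOURCE A (Python) =====
-- def solution(score):
--     length = len(score)
--     sorted_result = [[sum(score[i]), i] for i in range(length)]
--     sorted_result.sort(reverse=True)
--     answer = [0] * length
--     answer[sorted_result[0][1]] = 1
--     rank = 1
--     cnt = 0
--     for i in range(1, length):
--         avg, j = sorted_result[i]
--         if sorted_result[i-1][0] != avg:
--             rank += 1 + cnt
--             cnt = 0
--         else:
--             cnt += 1
--         answer[j] = rank
--     return answer
-- ===== SOURCE B (Python) =====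
-- def solution(score):
--     sums = [sum(row) for row in score]
--     return [1 + sum(1 for s in sums if s > x) for x in sums]
-- ===== Notes on version B (the rewrite author's own statement) =====
-- stated objective: simpler
-- what changed: B drops A's sort-and-tie-counter pass entirely: it computes each row's sum once and ranks every row as 1 plus the number of strictly greater sums, a two-line counting comprehension with no sorting, no index bookkeeping and no mutable answer array.
import Mathlib
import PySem

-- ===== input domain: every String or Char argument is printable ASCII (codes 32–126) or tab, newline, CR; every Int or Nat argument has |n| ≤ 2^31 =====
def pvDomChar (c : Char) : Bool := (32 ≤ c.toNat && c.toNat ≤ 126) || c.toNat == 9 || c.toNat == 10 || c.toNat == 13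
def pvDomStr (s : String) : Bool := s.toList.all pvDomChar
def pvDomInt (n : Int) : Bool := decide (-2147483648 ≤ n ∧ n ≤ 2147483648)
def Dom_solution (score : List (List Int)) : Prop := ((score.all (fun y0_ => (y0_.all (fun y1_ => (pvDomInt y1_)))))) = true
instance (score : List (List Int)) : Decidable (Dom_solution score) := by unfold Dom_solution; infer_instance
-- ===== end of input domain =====

-- B replaces A's sort-and-tie-counter pass by a direct count of strictly-greater score sums (simpler).

-- ===== PORT A =====
-- the 'for i in range(1, length)' loop over the sorted [sum, index] pairs, with prev = previous sum
def solLoop (rest : List (Int × Int)) (prev rank cnt : Int) (answer : List Int) : List Int :=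
  match rest with
  | [] => answer
  | (avg, j) :: rest' =>
    if prev ≠ avg then
      solLoop rest' avg (rank + 1 + cnt) 0 (PySem.List.pySetD answer j (rank + 1 + cnt))
    else
      solLoop rest' avg rank (cnt + 1) (PySem.List.pySetD answer j rank)

def solution (score : List (List Int)) : List Int :=
  let length := score.length
  let sorted_result := PySem.List.sorted2
      ((PySem.List.pyRange 0 (length : Int) 1).map (fun i => ((PySem.List.pyGetD score i []).sum, i)))
      Prod.fst Prod.snd true
  match sorted_result with
  | [] => []   -- Python raises IndexError here (empty score); excluded by Pre_solution
  | (a0, j0) :: rest =>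
      solLoop rest a0 1 0 (PySem.List.pySetD (List.replicate length (0 : Int)) j0 1)

-- ===== PORT B =====
def solution_alt (score : List (List Int)) : List Int :=
  let sums := score.map (fun row => row.sum)
  sums.map (fun x => 1 + ((sums.countP (fun s => decide (x < s))) : Int))

-- ===== PRECONDITION & SPEC =====
-- Pre_ excludes only the empty list, on which A raises IndexError (answer[sorted_result[0][1]]).
def Pre_solution (score : List (List Int)) : Prop := score ≠ []
instance (score : List (List Int)) : Decidable (Pre_solution score) := by unfold Pre_solution; infer_instance
def pvWitness_solution : List (List Int) := [[1, 2], [3], [0, 3]]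

def Spec_solution (score : List (List Int)) (out : List Int) : Prop := out = solution_alt score
instance (score : List (List Int)) (out : List Int) : Decidable (Spec_solution score out) := by unfold Spec_solution; infer_instance

-- ===== CLAIM (what is proved, stated in full; the proofs are below) =====
def Claim_equal_solution : Prop := ∀ (score : List (List Int)), Dom_solution score → Pre_solution score → Spec_solution score (solution score)

-- ===== LEMMAS AND PROOFS =====

-- Python's reverse list comparison used by A's sort: before a b  ↔  b <lex a
def pvBefore (a b : Int × Int) : Bool :=
  decide (b.1 < a.1) || (!decide (a.1 < b.1) && decide (b.2 < a.2))

theorem pvBefore_asymm (a b : Int × Int) (h : pvBefore a b = true) : pvBefore b a = false := by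
  obtain ⟨a1, a2⟩ := a; obtain ⟨b1, b2⟩ := b
  cases hba : pvBefore (b1, b2) (a1, a2) with
  | false => rfl
  | true =>
    exfalso
    simp only [pvBefore, Bool.or_eq_true, Bool.and_eq_true, Bool.not_eq_true', decide_eq_true_iff,
      decide_eq_false_iff_not] at h hba
    omega

theorem pvBefore_trans (a b c : Int × Int) (h1 : pvBefore a b = true) (h2 : pvBefore b c = true) :
    pvBefore a c = true := by
  obtain ⟨a1, a2⟩ := a; obtain ⟨b1, b2⟩ := b; obtain ⟨c1, c2⟩ := c
  simp only [pvBefore] at *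
  simp only [Bool.or_eq_true, Bool.and_eq_true, Bool.not_eq_true', decide_eq_true_iff,
    decide_eq_false_iff_not] at *
  omega

theorem insertBy_pairwise (x : Int × Int) (ys : List (Int × Int))
    (h : ys.Pairwise (fun a b => pvBefore b a = false)) :
    (PySem.List.insertBy pvBefore x ys).Pairwise (fun a b => pvBefore b a = false) := by
  induction ys with
  | nil => simp [PySem.List.insertBy]
  | cons y ys ih =>
    rw [List.pairwise_cons] at h
    by_cases hxy : pvBefore x y = true
    · have : PySem.List.insertBy pvBefore x (y :: ys) = x :: y :: ys := by
        simp [PySem.List.insertBy, hxy]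
      rw [this, List.pairwise_cons]
      constructor
      · intro z hz
        rcases List.mem_cons.mp hz with rfl | hz
        · exact pvBefore_asymm _ _ hxy
        · by_contra hzx
          have hzx' : pvBefore z x = true := by
            cases hb : pvBefore z x <;> simp_all
          have := pvBefore_trans z x y hzx' hxy
          have := h.1 z hz
          simp_all
      · exact List.pairwise_cons.mpr h
    · have : PySem.List.insertBy pvBefore x (y :: ys) = y :: PySem.List.insertBy pvBefore x ys := by
        cases hb : pvBefore x y
        · simp [PySem.List.insertBy, hb]
        · simp_all
      rw [this, List.pairwise_cons]
      refine ⟨?_, ih h.2⟩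
      intro z hz
      rcases (PySem.List.mem_insertBy pvBefore x z ys).mp hz with rfl | hz
      · simpa using hxy
      · exact h.1 z hz

theorem foldl_insertBy_pairwise (xs acc : List (Int × Int))
    (h : acc.Pairwise (fun a b => pvBefore b a = false)) :
    (xs.foldl (fun acc x => PySem.List.insertBy pvBefore x acc) acc).Pairwise
      (fun a b => pvBefore b a = false) := by
  induction xs generalizing acc with
  | nil => simpa
  | cons x xs ih => exact ih _ (insertBy_pairwise x acc h)

-- A's sorted list is pairwise non-increasing in the score sum
theorem sorted2_rev_mono (xs : List (Int × Int)) :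
    (PySem.List.sorted2 xs Prod.fst Prod.snd true).Pairwise (fun a b => b.1 ≤ a.1) := by
  have h : PySem.List.sorted2 xs Prod.fst Prod.snd true
      = xs.foldl (fun acc x => PySem.List.insertBy pvBefore x acc) [] := by
    simp only [PySem.List.sorted2]
    rfl
  rw [h]
  refine (foldl_insertBy_pairwise xs [] (by simp)).imp ?_
  intro a b hab
  simp only [pvBefore, Bool.or_eq_false_iff, decide_eq_false_iff_not] at hab
  omega

-- the loop invariant of A's ranking pass
theorem solLoop_spec (T : List (Int × Int)) (hmono : T.Pairwise (fun a b => b.1 ≤ a.1)) :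
    ∀ (S P : List (Int × Int)) (prev rank cnt : Int) (answer : List Int),
      T = P ++ S →
      (∀ p ∈ P, prev ≤ p.1) →
      (∀ p ∈ S, p.1 ≤ prev) →
      rank = 1 + ((P.countP (fun p => decide (prev < p.1))) : Int) →
      rank + cnt = (P.length : Int) →
      solLoop S prev rank cnt answer =
        S.foldl (fun ans e =>
          PySem.List.pySetD ans e.2 (1 + ((T.countP (fun p => decide (e.1 < p.1))) : Int))) answer := by
  intro S
  induction S with
  | nil => intro P prev rank cnt answer _ _ _ _ _; rfl
  | cons e S' ih =>
    intro P prev rank cnt answer hT hP hS hrank hcnt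
    obtain ⟨avg, j⟩ := e
    have havg_prev : avg ≤ prev := hS (avg, j) List.mem_cons_self
    have hPavg : ∀ p ∈ P, avg ≤ p.1 := fun p hp => le_trans havg_prev (hP p hp)
    have hS'avg : ∀ q ∈ S', q.1 ≤ avg := by
      intro q hq
      have := (List.pairwise_append.mp (hT ▸ hmono)).2.1
      exact (List.pairwise_cons.mp this).1 q hq
    have hsing : ∀ x : Int, List.countP (fun p => decide (x < p.1)) [(x, j)] = 0 := by
      intro x; simp
    have hcount : ((T.countP (fun p => decide (avg < p.1))) : Int)
        = ((P.countP (fun p => decide (avg < p.1))) : Int) := by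
      have h0 : ((avg, j) :: S').countP (fun p => decide (avg < p.1)) = 0 := by
        rw [List.countP_eq_zero]
        intro q hq
        rcases List.mem_cons.mp hq with rfl | hq
        · simp
        · simp only [decide_eq_true_iff, not_lt]
          exact hS'avg q hq
      rw [hT, List.countP_append, h0]
      simp
    by_cases hne : prev = avg
    · -- tie: same rank
      subst hne
      have hstep : solLoop ((prev, j) :: S') prev rank cnt answer
          = solLoop S' prev rank (cnt + 1) (PySem.List.pySetD answer j rank) := by
        simp [solLoop]
      have hT' : T = (P ++ [(prev, j)]) ++ S' := by simp [hT]
      have hP' : ∀ p ∈ P ++ [(prev, j)], prev ≤ p.1 := by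
        intro p hp
        rcases List.mem_append.mp hp with hp | hp
        · exact hP p hp
        · simp at hp; simp [hp]
      have hrank' : rank = 1 + (((P ++ [(prev, j)]).countP (fun p => decide (prev < p.1))) : Int) := by
        rw [List.countP_append, hsing]
        simpa using hrank
      have hcnt' : rank + (cnt + 1) = (((P ++ [(prev, j)]).length) : Int) := by
        simp only [List.length_append, List.length_cons, List.length_nil]
        push_cast
        omega
      rw [hstep, ih (P ++ [(prev, j)]) prev rank (cnt + 1) _ hT' hP' hS'avg hrank' hcnt',
        List.foldl_cons]
      congr 2
      rw [hcount, hrank]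
    · -- strictly smaller sum: rank jumps to number processed + 1
      have hlt : avg < prev := lt_of_le_of_ne havg_prev (fun h => hne h.symm)
      have hstep : solLoop ((avg, j) :: S') prev rank cnt answer
          = solLoop S' avg (rank + 1 + cnt) 0 (PySem.List.pySetD answer j (rank + 1 + cnt)) := by
        simp [solLoop, hne]
      have hfullP : ((P.countP (fun p => decide (avg < p.1))) : Int) = (P.length : Int) := by
        have : P.countP (fun p => decide (avg < p.1)) = P.length := by
          rw [List.countP_eq_length]
          intro p hp
          simp only [decide_eq_true_iff]
          exact lt_of_lt_of_le hlt (hP p hp)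
        rw [this]
      have hT' : T = (P ++ [(avg, j)]) ++ S' := by simp [hT]
      have hP' : ∀ p ∈ P ++ [(avg, j)], avg ≤ p.1 := by
        intro p hp
        rcases List.mem_append.mp hp with hp | hp
        · exact hPavg p hp
        · simp at hp; simp [hp]
      have hrank' : rank + 1 + cnt
          = 1 + (((P ++ [(avg, j)]).countP (fun p => decide (avg < p.1))) : Int) := by
        rw [List.countP_append, hsing]
        push_cast
        omega
      have hcnt' : rank + 1 + cnt + 0 = (((P ++ [(avg, j)]).length) : Int) := by
        simp only [List.length_append, List.length_cons, List.length_nil]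
        push_cast
        omega
      rw [hstep, ih (P ++ [(avg, j)]) avg (rank + 1 + cnt) 0 _ hT' hP' hS'avg hrank' hcnt',
        List.foldl_cons]
      congr 2
      rw [hcount, hfullP]
      omega

-- writing F(index) at each index of L, every position of acc ends up holding F
theorem foldl_pySetD_eq (F : Nat → Int) (V : Int × Int → Int) :
    ∀ (L : List (Int × Int)) (acc : List Int),
      (∀ e ∈ L, 0 ≤ e.2 ∧ e.2.toNat < acc.length ∧ V e = F e.2.toNat) →
      (∀ k, (hk : k < acc.length) → ((k : Int) ∈ L.map Prod.snd ∨ acc[k] = F k)) →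
      L.foldl (fun ans e => PySem.List.pySetD ans e.2 (V e)) acc
        = (List.range acc.length).map F := by
  intro L
  induction L with
  | nil =>
    intro acc _ hacc
    apply List.ext_getElem (by simp)
    intro k hk1 hk2
    simp only [List.getElem_map, List.getElem_range]
    rcases hacc k hk1 with h | h
    · simp at h
    · exact h
  | cons e L' ih =>
    intro acc hmem hacc
    rw [List.foldl_cons]
    obtain ⟨he0, helt, heV⟩ := hmem e List.mem_cons_self
    have hset : PySem.List.pySetD acc e.2 (V e) = acc.set e.2.toNat (V e) :=
      PySem.List.pySetD_of_nonneg acc (V e) he0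
    have hlen : (acc.set e.2.toNat (V e)).length = acc.length := by simp
    rw [hset, ih (acc.set e.2.toNat (V e)) ?_ ?_, hlen]
    · intro f hf
      have := hmem f (List.mem_cons_of_mem _ hf)
      simpa [hlen] using this
    · intro k hk
      have hk' : k < acc.length := by simpa [hlen] using hk
      by_cases hke : k = e.2.toNat
      · right
        subst hke
        rw [List.getElem_set_self]
        exact heV
      · rcases hacc k hk' with h | h
        · simp only [List.map_cons, List.mem_cons] at h
          rcases h with h' | h'
          · exfalso; apply hke; omega
          · left; exact h'
        · right
          rw [List.getElem_set_ne (by omega), h]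

-- ===== VERDICT (by name: the statement is the Claim_ definition above) =====
theorem solution_spec : Claim_equal_solution := by
  intro score _ hpre
  unfold Spec_solution
  set n := score.length with hn
  set sums := score.map (fun row => row.sum) with hsumsdef
  set pairs := (List.range n).map (fun k => ((score.getD k []).sum, (k : Int))) with hpairsdef
  have hsums : ∀ k, k < n → sums.getD k 0 = (score.getD k []).sum := by
    intro k hk
    rw [hsumsdef, List.getD_eq_getElem _ _ (by simpa using hk), List.getD_eq_getElem _ _ hk,
      List.getElem_map]
  have hpairs : (PySem.List.pyRange 0 (n : Int) 1).map
      (fun i => ((PySem.List.pyGetD score i []).sum, i)) = pairs := by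
    rw [PySem.List.pyRange_zero_natCast, List.map_map, hpairsdef]
    apply List.map_congr_left
    intro k _
    simp only [Function.comp]
    rw [PySem.List.pyGetD_natCast]
  set T := PySem.List.sorted2 pairs Prod.fst Prod.snd true with hTdef
  have hTperm : T.Perm pairs := PySem.List.sorted2_perm pairs Prod.fst Prod.snd true
  have hmono : T.Pairwise (fun a b => b.1 ≤ a.1) := sorted2_rev_mono pairs
  have hrangemap : (List.range n).map (fun k => score.getD k []) = score := by
    apply List.ext_getElem (by simp [hn])
    intro k hk1 hk2
    simp only [List.getElem_map, List.getElem_range]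
    rw [List.getD_eq_getElem _ _ hk2]
  have hcountconv : ∀ x : Int, ((T.countP (fun p => decide (x < p.1))) : Int)
      = ((sums.countP (fun s => decide (x < s))) : Int) := by
    intro x
    rw [hTperm.countP_eq, hpairsdef, List.countP_map, hsumsdef, List.countP_map]
    norm_cast
    conv_rhs => rw [← hrangemap]
    rw [List.countP_map]
    rfl
  have hmemT : ∀ e ∈ T, ∃ k, k < n ∧ e = ((score.getD k []).sum, (k : Int)) := by
    intro e he
    have := hTperm.mem_iff.mp he
    rw [hpairsdef, List.mem_map] at this
    obtain ⟨k, hk, hke⟩ := this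
    exact ⟨k, by simpa using hk, hke.symm⟩
  have hsol : solution score
      = match T with
        | [] => []
        | (a0, j0) :: rest => solLoop rest a0 1 0 (PySem.List.pySetD (List.replicate n (0 : Int)) j0 1) := by
    simp only [solution, ← hn, hpairs, ← hTdef]
  -- the sorted list is nonempty
  obtain ⟨a0, j0, rest, hTcons⟩ : ∃ a0 j0 rest, T = (a0, j0) :: rest := by
    cases hT : T with
    | nil =>
      exfalso
      rw [hT] at hTperm
      have h3 : pairs = [] := hTperm.symm.eq_nil
      rw [hpairsdef] at h3
      simp only [List.map_eq_nil_iff, List.range_eq_nil] at h3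
      exact hpre (List.length_eq_zero_iff.mp (hn ▸ h3))
    | cons e rest =>
      obtain ⟨x, y⟩ := e
      exact ⟨x, y, rest, rfl⟩
  rw [hTcons] at hmono hTperm hcountconv hmemT hsol
  rw [hsol]
  show solLoop rest a0 1 0 (PySem.List.pySetD (List.replicate n (0 : Int)) j0 1)
      = solution_alt score
  have hS : ∀ p ∈ rest, p.1 ≤ a0 := (List.pairwise_cons.mp hmono).1
  have hloop := solLoop_spec ((a0, j0) :: rest) hmono rest [(a0, j0)] a0 1 0
    (PySem.List.pySetD (List.replicate n (0 : Int)) j0 1) rfl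
    (by intro p hp; simp at hp; simp [hp]) hS (by simp) (by simp)
  rw [hloop]
  -- the head assignment has the same closed-form value 1
  have hhead : (1 : Int)
      = 1 + ((((a0, j0) :: rest).countP (fun p => decide (a0 < p.1))) : Int) := by
    have h0 : ((a0, j0) :: rest).countP (fun p => decide (a0 < p.1)) = 0 := by
      rw [List.countP_eq_zero]
      intro q hq
      rcases List.mem_cons.mp hq with rfl | hq
      · simp
      · simp only [decide_eq_true_iff, not_lt]
        exact hS q hq
    rw [h0]
    simp
  have hfold : solution_alt score
      = ((a0, j0) :: rest).foldl (fun ans e =>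
          PySem.List.pySetD ans e.2
            (1 + ((((a0, j0) :: rest).countP (fun p => decide (e.1 < p.1))) : Int)))
        (List.replicate n (0 : Int)) := by
    rw [foldl_pySetD_eq (fun k => 1 + ((sums.countP (fun s => decide (sums.getD k 0 < s))) : Int))
      _ ((a0, j0) :: rest) (List.replicate n (0 : Int)) ?_ ?_]
    · -- B's output equals the range-indexed map
      rw [List.length_replicate]
      apply List.ext_getElem (by simp [solution_alt, hsumsdef, hn])
      intro k hk1 hk2
      have hks : k < sums.length := by simpa [hsumsdef] using hk2
      simp only [solution_alt, ← hsumsdef, List.getElem_map, List.getElem_range]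
      rw [List.getD_eq_getElem _ _ hks]
    · intro e he
      obtain ⟨k, hk, rfl⟩ := hmemT e he
      refine ⟨by simp, by simpa using hk, ?_⟩
      simp only [Int.toNat_natCast]
      rw [hcountconv]
      simp only [hsums k hk]
    · intro k hk
      left
      have : ((k : Int)) ∈ pairs.map Prod.snd := by
        rw [hpairsdef, List.map_map, List.mem_map]
        exact ⟨k, by simpa [List.length_replicate] using hk, rfl⟩
      exact ((hTperm.map Prod.snd).mem_iff).mpr this
  rw [hfold, List.foldl_cons, ← hhead]
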